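-- pv_equiv track=rewrite | github.com/Kimyechan/codingTestPractice | programmers/고득점Kit복습/heap/이중우선순위큐.py | solution
-- ===== SOURCE A (Python) =====
-- from collections import defaultdict
-- import heapq
--
-- def solution(operations):
--     answer = []
--     maxHeap = []
--     minHeap = []
--
--     numCheck = defaultdict(int)
--     numList = []
--     for operation in operations:
--         command = operation.split(" ")
--         if command[0] == "I":
--             heapq.heappush(minHeap, int(command[1]))
--             heapq.heappush(maxHeap, -int(command[1]))
--             numCheck[int(command[1])] += 1
--             numList.append(int(command[1]))
--         elif command[0] == "D" and command[1] == "1":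
--             if len(maxHeap) == 0:
--                 continue
--             num = heapq.heappop(maxHeap)
--             while numCheck[-num] == 0:
--                 if len(maxHeap) == 0:
--                     break
--                 num = heapq.heappop(maxHeap)
--             if numCheck[-num] != 0:
--                 numCheck[-num] -= 1
--         elif command[0] == "D" and command[1] == "-1":
--             if len(minHeap) == 0:
--                 continue
--             num = heapq.heappop(minHeap)
--             while numCheck[num] == 0:
--                 if len(minHeap) == 0:
--                     break
--                 num = heapq.heappop(minHeap)
--             if numCheck[num] != 0:
--                 numCheck[num] -= 1
--
--     numRemain = []
--     for num in numList:
--         while numCheck[num] != 0: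
--             numCheck[num] -= 1
--             numRemain.append(num)
--     if len(numRemain) == 0:
--         answer = [0, 0]
--     else:
--         numRemain.sort()
--         answer = [numRemain[-1], numRemain[0]]
--
--     return answer
-- ===== SOURCE B (Python) =====
-- def solution(operations):
--     values = []
--     for operation in operations:
--         command = operation.split(" ")
--         if command[0] == "I":
--             values.append(int(command[1]))
--         elif command[0] == "D" and command[1] == "1":
--             if values:
--                 values.remove(max(values))
--         elif command[0] == "D" and command[1] == "-1":
--             if values:
--                 values.remove(min(values))
--     if not values:
--         return [0, 0]
--     return [max(values), min(values)]
-- ===== Notes on version B (the rewrite author's own statement) =====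
-- stated objective: simpler
-- what changed: Replaces the two lazy-deletion heaps, the occurrence-count dict, the insertion log and the final rebuild-and-sort with a single plain list of the live values: D operations remove one occurrence of max/min directly, and the answer is just [max(values), min(values)].
import Mathlib
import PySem

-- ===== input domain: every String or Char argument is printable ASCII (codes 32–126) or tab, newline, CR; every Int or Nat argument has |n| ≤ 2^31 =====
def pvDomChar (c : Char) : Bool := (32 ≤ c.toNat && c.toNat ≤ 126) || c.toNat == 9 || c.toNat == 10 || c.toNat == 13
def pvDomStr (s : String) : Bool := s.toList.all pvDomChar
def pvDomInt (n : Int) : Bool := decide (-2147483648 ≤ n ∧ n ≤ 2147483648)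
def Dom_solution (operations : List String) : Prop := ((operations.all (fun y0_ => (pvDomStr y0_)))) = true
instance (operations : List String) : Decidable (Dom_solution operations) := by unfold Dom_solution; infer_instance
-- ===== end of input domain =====

-- B replaces A's two lazy-deletion heaps + count dict + insertion log + final rebuild/sort
-- with a single list of live values (remove one max / one min directly); objective: simpler.

-- ===== PORT A =====
-- heapq.heappush / heappop are library calls, modelled by contract: the heap is kept as an
-- ascending sorted list (orderedInsert = push, head/tail = pop-min), which pops exactly the
-- values CPython's heapq pops.
-- the lazy-deletion 'while numCheck[...] == 0: ... heappop' loop of A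
def drainA (check : PySem.Dict Int Int) (s : Int) : Int → List Int → Int × List Int
  | num, [] => (num, [])
  | num, h :: t =>
    if check.getD (s * num) 0 = 0 then drainA check s h t else (num, h :: t)

-- one iteration of A's main 'for operation in operations' loop; state = (maxHeap, minHeap, numCheck, numList)
def stepA (st : List Int × List Int × PySem.Dict Int Int × List Int) (operation : String) :
    List Int × List Int × PySem.Dict Int Int × List Int :=
  let command := (PySem.Str.split? operation " ").getD []
  if PySem.List.pyGet? command 0 = some "I" then
    match PySem.Int.ofStr? ((PySem.List.pyGet? command 1).getD "") with
    | some n =>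
        (List.orderedInsert (· ≤ ·) (-n) st.1,
         List.orderedInsert (· ≤ ·) n st.2.1,
         st.2.2.1.modify n 0 (· + 1),
         st.2.2.2 ++ [n])
    | none => st
  else if PySem.List.pyGet? command 0 = some "D" ∧ PySem.List.pyGet? command 1 = some "1" then
    if st.1 = [] then st
    else
      let r := drainA st.2.2.1 (-1) (st.1.headD 0) st.1.tail
      if st.2.2.1.getD (-r.1) 0 ≠ 0 then
        (r.2, st.2.1, st.2.2.1.modify (-r.1) 0 (· - 1), st.2.2.2)
      else (r.2, st.2.1, st.2.2.1, st.2.2.2)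
  else if PySem.List.pyGet? command 0 = some "D" ∧ PySem.List.pyGet? command 1 = some "-1" then
    if st.2.1 = [] then st
    else
      let r := drainA st.2.2.1 1 (st.2.1.headD 0) st.2.1.tail
      if st.2.2.1.getD r.1 0 ≠ 0 then
        (st.1, r.2, st.2.2.1.modify r.1 0 (· - 1), st.2.2.2)
      else (st.1, r.2, st.2.2.1, st.2.2.2)
  else st

-- one iteration of A's final 'for num in numList: while numCheck[num] != 0: …' rebuild loop
def rebuildStep (acc : List Int × PySem.Dict Int Int) (num : Int) : List Int × PySem.Dict Int Int :=
  (acc.1 ++ List.replicate ((acc.2.getD num 0).toNat) num, acc.2.insert num 0)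

def solution (operations : List String) : List Int :=
  let st := operations.foldl stepA ([], [], PySem.Dict.empty, [])
  let numRemain := (st.2.2.2.foldl rebuildStep ([], st.2.2.1)).1
  if numRemain = [] then [0, 0]
  else
    let s := PySem.List.sorted numRemain (fun x => x)
    [(PySem.List.pyGet? s (-1)).getD 0, (PySem.List.pyGet? s 0).getD 0]

-- ===== PORT B =====
def stepB (values : List Int) (operation : String) : List Int :=
  let command := (PySem.Str.split? operation " ").getD []
  if PySem.List.pyGet? command 0 = some "I" then
    match PySem.Int.ofStr? ((PySem.List.pyGet? command 1).getD "") with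
    | some n => values ++ [n]
    | none => values
  else if PySem.List.pyGet? command 0 = some "D" ∧ PySem.List.pyGet? command 1 = some "1" then
    if values = [] then values
    else (PySem.List.remove? values ((PySem.List.max? values (fun y => y)).getD 0)).getD values
  else if PySem.List.pyGet? command 0 = some "D" ∧ PySem.List.pyGet? command 1 = some "-1" then
    if values = [] then values
    else (PySem.List.remove? values ((PySem.List.min? values (fun y => y)).getD 0)).getD values
  else values

def solution_alt (operations : List String) : List Int :=
  let values := operations.foldl stepB []
  if values = [] then [0, 0]
  else [(PySem.List.max? values (fun y => y)).getD 0,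
        (PySem.List.min? values (fun y => y)).getD 0]

-- ===== PRECONDITION & SPEC =====
-- Pre_ excludes exactly the operations on which Python raises: an "I …" whose second token is
-- missing (IndexError) or not an int literal (ValueError), and a "D" with no second token (IndexError).
def PreOp (op : String) : Prop :=
  (PySem.List.pyGet? ((PySem.Str.split? op " ").getD []) 0 = some "I" →
     2 ≤ ((PySem.Str.split? op " ").getD []).length ∧
     (PySem.Int.ofStr? ((PySem.List.pyGet? ((PySem.Str.split? op " ").getD []) 1).getD "")).isSome = true) ∧
  (PySem.List.pyGet? ((PySem.Str.split? op " ").getD []) 0 = some "D" →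
     2 ≤ ((PySem.Str.split? op " ").getD []).length)

def Pre_solution (operations : List String) : Prop := ∀ op ∈ operations, PreOp op
instance (operations : List String) : Decidable (Pre_solution operations) := by
  unfold Pre_solution PreOp; infer_instance

def pvWitness_solution : List String := ["I 16", "I 7", "D 1", "I -3", "D -1", "X"]

def Spec_solution (operations : List String) (out : List Int) : Prop := out = solution_alt operations
instance (operations : List String) (out : List Int) : Decidable (Spec_solution operations out) := by unfold Spec_solution; infer_instance

-- ===== CLAIM (what is proved, stated in full; the proofs are below) =====
def Claim_equal_solution : Prop := ∀ (operations : List String), Dom_solution operations → Pre_solution operations → Spec_solution operations (solution operations)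

-- ===== LEMMAS AND PROOFS =====

-- the simulation invariant between A's state and B's list of live values
def InvST (st : List Int × List Int × PySem.Dict Int Int × List Int) (values : List Int) : Prop :=
  st.1.Pairwise (· ≤ ·) ∧ st.2.1.Pairwise (· ≤ ·) ∧
  (∀ v : Int, st.2.2.1.getD v 0 = (values.count v : Int)) ∧
  (∀ v : Int, values.count v ≤ st.2.1.count v) ∧
  (∀ v : Int, values.count v ≤ st.1.count (-v)) ∧
  (∀ v : Int, v ∈ values → v ∈ st.2.2.2)

lemma drain_spec (check : PySem.Dict Int Int) (s : Int) (L : List Int)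
    (hc : ∀ v : Int, check.getD (s * v) 0 = (L.count v : Int)) :
    ∀ (heap : List Int) (num : Int), (num :: heap).Pairwise (· ≤ ·) →
    (∀ v, L.count v ≤ (num :: heap).count v) →
    (((drainA check s num heap).1 :: (drainA check s num heap).2).Pairwise (· ≤ ·) ∧
     (∀ v, L.count v ≤ ((drainA check s num heap).1 :: (drainA check s num heap).2).count v) ∧
     (L = [] → check.getD (s * (drainA check s num heap).1) 0 = 0) ∧
     (L ≠ [] → check.getD (s * (drainA check s num heap).1) 0 ≠ 0 ∧
        (drainA check s num heap).1 ∈ L ∧ ∀ x ∈ L, (drainA check s num heap).1 ≤ x)) := by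
  intro heap
  induction heap with
  | nil =>
    intro num hp hcov
    simp only [drainA]
    by_cases h0 : check.getD (s * num) 0 = 0
    · have hLnil : L = [] := by
        rcases hL : L with _ | ⟨a, L'⟩
        · rfl
        · exfalso
          subst hL
          have ha : 0 < List.count a (a :: L') := List.count_pos_iff.mpr List.mem_cons_self
          have hmem : a ∈ [num] := List.count_pos_iff.mp (lt_of_lt_of_le ha (hcov a))
          have hanum : a = num := by simpa using hmem
          have hccc := hc a
          rw [hanum, h0] at hccc
          have h1 : 0 < List.count num (num :: L') := List.count_pos_iff.mpr List.mem_cons_self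
          omega
      refine ⟨hp, hcov, fun _ => h0, fun hne => absurd hLnil hne⟩
    · have hcnt : 0 < L.count num := by
        rcases Nat.eq_zero_or_pos (L.count num) with hz | hpos
        · exact absurd (by rw [hc num, hz]; simp) h0
        · exact hpos
      refine ⟨hp, hcov, ?_, fun _ => ⟨h0, List.count_pos_iff.mp hcnt, ?_⟩⟩
      · intro hL; subst hL; have := hc num; simpa using this
      · intro x hx
        have hxc : 0 < L.count x := List.count_pos_iff.mpr hx
        have hmem : x ∈ [num] := List.count_pos_iff.mp (lt_of_lt_of_le hxc (hcov x))
        have : x = num := by simpa using hmem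
        omega
  | cons h t ih =>
    intro num hp hcov
    by_cases h0 : check.getD (s * num) 0 = 0
    · simp only [drainA, if_pos h0]
      apply ih
      · exact hp.tail
      · intro v
        by_cases hv : v = num
        · subst hv
          have hz : L.count v = 0 := by have := hc v; omega
          omega
        · have hv' : num ≠ v := fun hh => hv hh.symm
          simpa [List.count_cons, hv'] using hcov v
    · simp only [drainA, if_neg h0]
      have hcnt : 0 < L.count num := by
        rcases Nat.eq_zero_or_pos (L.count num) with hz | hpos
        · exact absurd (by rw [hc num, hz]; simp) h0
        · exact hpos
      refine ⟨hp, hcov, ?_, fun _ => ⟨h0, List.count_pos_iff.mp hcnt, ?_⟩⟩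
      · intro hL; subst hL; have := hc num; simpa using this
      · intro x hx
        have hxc : 0 < L.count x := List.count_pos_iff.mpr hx
        have hmem : x ∈ num :: h :: t := List.count_pos_iff.mp (lt_of_lt_of_le hxc (hcov x))
        rcases List.mem_cons.mp hmem with rfl | hmem'
        · exact le_refl _
        · exact List.rel_of_pairwise_cons hp hmem'

lemma rebuild_count (L : List Int) : ∀ (acc : List Int) (d : PySem.Dict Int Int) (v : Int),
    ((L.foldl rebuildStep (acc, d)).1).count v
      = acc.count v + (if v ∈ L then (d.getD v 0).toNat else 0) := by
  induction L with
  | nil => intro acc d v; simp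
  | cons num rest ih =>
    intro acc d v
    have : (num :: rest).foldl rebuildStep (acc, d) = rest.foldl rebuildStep (rebuildStep (acc, d) num) := rfl
    rw [this]
    rw [show rebuildStep (acc, d) num = (acc ++ List.replicate ((d.getD num 0).toNat) num, d.insert num 0) from rfl]
    rw [ih]
    by_cases hv : v = num
    · subst hv
      simp [List.count_append]
    · have hv' : num ≠ v := fun hh => hv hh.symm
      simp [List.count_append, List.count_replicate, PySem.Dict.getD_insert, hv, hv']

lemma count_map_neg (values : List Int) (v : Int) :
    (values.map (fun u : Int => -u)).count v = values.count (-v) := by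
  have := List.count_map_of_injective values (fun u : Int => -u) neg_injective (-v)
  simpa using this

lemma eq_nil_of_count_le_zero {values : List Int} (h : ∀ v : Int, values.count v = 0) :
    values = [] := by
  rcases values with _ | ⟨a, t⟩
  · rfl
  · have := h a; simp [List.count_cons_self] at this

lemma step_inv (st : List Int × List Int × PySem.Dict Int Int × List Int) (values : List Int)
    (op : String) (h : InvST st values) : InvST (stepA st op) (stepB values op) := by
  obtain ⟨mx, mn, ck, nl⟩ := st
  simp only [InvST] at h ⊢
  obtain ⟨hmx, hmn, hck, hmin, hmax, hmem⟩ := h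
  simp only [stepA, stepB]
  by_cases hI : PySem.List.pyGet? ((PySem.Str.split? op " ").getD []) 0 = some "I"
  · simp only [if_pos hI]
    cases hn : PySem.Int.ofStr? ((PySem.List.pyGet? ((PySem.Str.split? op " ").getD []) 1).getD "") with
    | none => exact ⟨hmx, hmn, hck, hmin, hmax, hmem⟩
    | some n =>
      refine ⟨hmx.orderedInsert (-n), hmn.orderedInsert n, ?_, ?_, ?_, ?_⟩
      · intro v
        rw [PySem.Dict.getD_modify]
        by_cases hv : v = n
        · subst hv; simp [List.count_append, hck v]
        · have hv' : n ≠ v := fun hh => hv hh.symm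
          simp [List.count_append, hck v, hv, hv']
      · intro v
        rw [List.orderedInsert_count]
        have := hmin v
        by_cases hv : n = v
        · subst hv; simp [List.count_append]; omega
        · simp [List.count_append, hv]; omega
      · intro v
        rw [List.orderedInsert_count]
        have := hmax v
        by_cases hv : n = v
        · subst hv; simp [List.count_append]; omega
        · have hv2 : ¬ (-n = -v) := fun hh => hv (neg_injective hh)
          simp [List.count_append, hv, hv2]; omega
      · intro v hv
        rcases List.mem_append.mp hv with hv1 | hv1
        · exact List.mem_append.mpr (Or.inl (hmem v hv1))
        · exact List.mem_append.mpr (Or.inr hv1)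
  · simp only [if_neg hI]
    by_cases hD1 : PySem.List.pyGet? ((PySem.Str.split? op " ").getD []) 0 = some "D" ∧
        PySem.List.pyGet? ((PySem.Str.split? op " ").getD []) 1 = some "1"
    · simp only [if_pos hD1]
      by_cases hmxe : mx = []
      · -- maxHeap empty: all counts are 0, so values = [] and B also does nothing
        rw [if_pos hmxe]
        subst hmxe
        have hvnil : values = [] := eq_nil_of_count_le_zero (fun v => by
          have := hmax v; simpa using this)
        subst hvnil
        rw [if_pos rfl]
        exact ⟨hmx, hmn, hck, hmin, hmax, hmem⟩
      · rw [if_neg hmxe]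
        obtain ⟨h1, t1, rfl⟩ : ∃ h1 t1, mx = h1 :: t1 := by
          rcases mx with _ | ⟨a, b⟩
          · exact absurd rfl hmxe
          · exact ⟨a, b, rfl⟩
        simp only [List.headD_cons, List.tail_cons]
        have hD := drain_spec ck (-1) (values.map (fun u : Int => -u))
          (fun v => by rw [neg_one_mul, count_map_neg]; exact hck (-v)) t1 h1 hmx
          (fun v => by rw [count_map_neg]; have := hmax (-v); simpa using this)
        set r := drainA ck (-1) h1 t1 with hr
        obtain ⟨hDp, hDcov, hDnil, hDne⟩ := hD
        by_cases hvne : values = []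
        · -- values empty: the lazy pop finds nothing; neither side touches counts
          rw [if_pos hvne]
          subst hvne
          have h0 : ck.getD (-r.1) 0 = 0 := by
            have := hDnil (by simp); rwa [neg_one_mul] at this
          rw [if_neg (not_not_intro h0)]
          refine ⟨hDp.tail, hmn, hck, fun v => by simp, fun v => by simp, fun v hv => by simp at hv⟩
        · rw [if_neg hvne]
          obtain ⟨hne0, hmemL, hmaxL⟩ := hDne (by simpa using hvne)
          -- r.1 is the negation of the maximum of values
          obtain ⟨u, hu, huq⟩ := List.mem_map.mp hmemL
          have hmemneg : -r.1 ∈ values := by rw [show -r.1 = u by omega]; exact hu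
          have hub : ∀ w ∈ values, w ≤ -r.1 := fun w hw => by
            have := hmaxL (-w) (List.mem_map_of_mem hw); omega
          rcases hM : PySem.List.max? values (fun y => y) with _ | m
          · exact absurd ((PySem.List.max?_eq_none_iff _ _).mp hM) hvne
          · simp only [Option.getD_some]
            have hmv : m ∈ values := PySem.List.max?_mem hM
            have hmub : ∀ y ∈ values, y ≤ m := PySem.List.max?_isMax hM
            have hmeq : m = -r.1 := le_antisymm (hub m hmv) (hmub _ hmemneg)
            rw [PySem.List.remove?_eq_some_erase values m hmv]
            simp only [Option.getD_some]
            rw [if_pos (by rwa [neg_one_mul] at hne0)]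
            dsimp only
            subst hmeq
            have hcountm : 0 < values.count (-r.1) := List.count_pos_iff.mpr hmemneg
            refine ⟨hDp.tail, hmn, ?_, ?_, ?_, ?_⟩
            · intro v
              rw [PySem.Dict.getD_modify]
              by_cases hv : v = -r.1
              · rw [if_pos hv, hv, List.count_erase_self, hck (-r.1)]
                omega
              · rw [if_neg hv, List.count_erase_of_ne hv, hck v]
            · intro v
              exact le_trans (List.Sublist.count_le v List.erase_sublist) (hmin v)
            · intro v
              have hcov := hDcov (-v)
              rw [count_map_neg, neg_neg] at hcov
              by_cases hv : v = -r.1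
              · rw [hv, List.count_erase_self, show (-(-r.1) : Int) = r.1 by ring]
                rw [hv, show -(-r.1) = r.1 by ring, List.count_cons_self] at hcov
                omega
              · rw [List.count_erase_of_ne hv]
                have hvr : r.1 ≠ -v := fun hh => hv (by omega)
                rwa [List.count_cons_of_ne hvr] at hcov
            · intro v hv
              exact hmem v (values.mem_of_mem_erase hv)
    · simp only [if_neg hD1]
      by_cases hD2 : PySem.List.pyGet? ((PySem.Str.split? op " ").getD []) 0 = some "D" ∧
          PySem.List.pyGet? ((PySem.Str.split? op " ").getD []) 1 = some "-1"
      · simp only [if_pos hD2]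
        by_cases hmne : mn = []
        · rw [if_pos hmne]
          subst hmne
          have hvnil : values = [] := eq_nil_of_count_le_zero (fun v => by
            have := hmin v; simpa using this)
          subst hvnil
          rw [if_pos rfl]
          exact ⟨hmx, hmn, hck, hmin, hmax, hmem⟩
        · rw [if_neg hmne]
          obtain ⟨h1, t1, rfl⟩ : ∃ h1 t1, mn = h1 :: t1 := by
            rcases mn with _ | ⟨a, b⟩
            · exact absurd rfl hmne
            · exact ⟨a, b, rfl⟩
          simp only [List.headD_cons, List.tail_cons]
          have hD := drain_spec ck 1 values
            (fun v => by rw [one_mul]; exact hck v) t1 h1 hmn (fun v => hmin v)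
          set r := drainA ck 1 h1 t1 with hr
          obtain ⟨hDp, hDcov, hDnil, hDne⟩ := hD
          by_cases hvne : values = []
          · rw [if_pos hvne]
            subst hvne
            have h0 : ck.getD r.1 0 = 0 := by
              have := hDnil rfl; rwa [one_mul] at this
            rw [if_neg (not_not_intro h0)]
            refine ⟨hmx, hDp.tail, hck, fun v => by simp, fun v => by simp, fun v hv => by simp at hv⟩
          · rw [if_neg hvne]
            obtain ⟨hne0, hmemL, hminL⟩ := hDne hvne
            rcases hM : PySem.List.min? values (fun y => y) with _ | m
            · exact absurd ((PySem.List.min?_eq_none_iff _ _).mp hM) hvne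
            · simp only [Option.getD_some]
              have hmv : m ∈ values := PySem.List.min?_mem hM
              have hmlb : ∀ y ∈ values, m ≤ y := PySem.List.min?_isMin hM
              have hmeq : m = r.1 := le_antisymm (hmlb _ hmemL) (hminL m hmv)
              rw [PySem.List.remove?_eq_some_erase values m hmv]
              simp only [Option.getD_some]
              rw [if_pos (by rwa [one_mul] at hne0)]
              dsimp only
              subst hmeq
              have hcountm : 0 < values.count r.1 := List.count_pos_iff.mpr hmemL
              refine ⟨hmx, hDp.tail, ?_, ?_, ?_, ?_⟩
              · intro v
                rw [PySem.Dict.getD_modify]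
                by_cases hv : v = r.1
                · rw [if_pos hv, hv, List.count_erase_self, hck r.1]
                  omega
                · rw [if_neg hv, List.count_erase_of_ne hv, hck v]
              · intro v
                have hcov := hDcov v
                by_cases hv : v = r.1
                · rw [hv, List.count_erase_self]
                  rw [hv, List.count_cons_self] at hcov
                  omega
                · rw [List.count_erase_of_ne hv]
                  rwa [List.count_cons_of_ne (fun hh => hv hh.symm)] at hcov
              · intro v
                exact le_trans (List.Sublist.count_le v List.erase_sublist) (hmax v)
              · intro v hv
                exact hmem v (values.mem_of_mem_erase hv)
      · simp only [if_neg hD2]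
        exact ⟨hmx, hmn, hck, hmin, hmax, hmem⟩

lemma fold_inv (ops : List String) :
    ∀ st values, InvST st values → InvST (ops.foldl stepA st) (ops.foldl stepB values) := by
  intro st values h
  induction ops generalizing st values with
  | nil => exact h
  | cons op rest ih => exact ih _ _ (step_inv st values op h)

lemma le_getLast_of_pairwise {l : List Int} (hp : l.Pairwise (· ≤ ·)) (x : Int) (hx : x ∈ l)
    (h : l ≠ []) : x ≤ l.getLast h := by
  induction l with
  | nil => simp at hx
  | cons a t ih =>
    rcases t with _ | ⟨b, t'⟩
    · simp at hx; simp [hx, List.getLast]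
    · rw [List.getLast_cons (by simp)]
      rcases List.mem_cons.mp hx with rfl | hx'
      · exact le_trans (List.rel_of_pairwise_cons hp (List.getLast_mem _)) (le_refl _)
      · exact ih hp.tail hx' (by simp)

-- ===== VERDICT (by name: the statement is the Claim_ definition above) =====
lemma final_eq (st : List Int × List Int × PySem.Dict Int Int × List Int) (V : List Int)
    (h : InvST st V) :
    (if (st.2.2.2.foldl rebuildStep ([], st.2.2.1)).1 = [] then ([0, 0] : List Int)
     else
       [(PySem.List.pyGet? (PySem.List.sorted (st.2.2.2.foldl rebuildStep ([], st.2.2.1)).1 (fun x => x)) (-1)).getD 0,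
        (PySem.List.pyGet? (PySem.List.sorted (st.2.2.2.foldl rebuildStep ([], st.2.2.1)).1 (fun x => x)) 0).getD 0])
    = (if V = [] then ([0, 0] : List Int)
       else [(PySem.List.max? V (fun y => y)).getD 0, (PySem.List.min? V (fun y => y)).getD 0]) := by
  obtain ⟨hmx, hmn, hck, hmin, hmax, hmem⟩ := h
  set R := (st.2.2.2.foldl rebuildStep ([], st.2.2.1)).1 with hRdef
  have hRc : ∀ v : Int, R.count v = V.count v := by
    intro v
    rw [hRdef, rebuild_count]
    by_cases hv : v ∈ st.2.2.2
    · rw [if_pos hv]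
      have := hck v
      simp only [List.count_nil, Nat.zero_add]
      omega
    · rw [if_neg hv]
      have hvV : v ∉ V := fun hh => hv (hmem v hh)
      simp [List.count_eq_zero_of_not_mem hvV]
  have hperm : R.Perm V := List.perm_iff_count.mpr hRc
  by_cases hR : R = []
  · have hV : V = [] := (hR ▸ hperm).symm.eq_nil
    rw [if_pos hR, if_pos hV]
  · have hV : V ≠ [] := fun hh => hR (hh ▸ hperm).eq_nil
    rw [if_neg hR, if_neg hV]
    set s := PySem.List.sorted R (fun x : Int => x) with hsdef
    have hsne : s ≠ [] := by
      rw [hsdef, Ne, PySem.List.sorted_eq_nil_iff]; exact hR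
    have hsperm : s.Perm R := PySem.List.sorted_perm R (fun x : Int => x) false
    have hsp : s.Pairwise (· ≤ ·) := PySem.List.sorted_pairwise R (fun x : Int => x)
    rcases hse : s with _ | ⟨m, t⟩
    · exact absurd hse hsne
    · have hhead : ∀ y ∈ R, m ≤ y :=
        PySem.List.key_head_sorted_le R (fun x : Int => x) (by rw [← hsdef, hse])
      have hmemRV : ∀ x : Int, x ∈ R ↔ x ∈ V := fun x => hperm.mem_iff
      rcases hM : PySem.List.max? V (fun y => y) with _ | Mv
      · exact absurd ((PySem.List.max?_eq_none_iff _ _).mp hM) hV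
      · rcases hm : PySem.List.min? V (fun y => y) with _ | mv
        · exact absurd ((PySem.List.min?_eq_none_iff _ _).mp hm) hV
        · have hg : PySem.List.pyGet? (m :: t) (-1) = some ((m :: t).getLast (by simp)) := by
            conv_lhs => rw [← List.dropLast_append_getLast (l := m :: t) (by simp)]
            exact PySem.List.pyGet?_neg_one_append_singleton _ _
          rw [hg]
          have h0 : PySem.List.pyGet? (m :: t) 0 = some m := by
            simp [PySem.List.pyGet?, PySem.List.pyIdx?]
          rw [h0]
          simp only [Option.getD_some]
          have hgmem : (m :: t).getLast (by simp) ∈ V :=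
            (hmemRV _).mp (hsperm.mem_iff.mp (by rw [hse]; exact List.getLast_mem (by simp)))
          have hmem_m : m ∈ V := (hmemRV m).mp (hsperm.mem_iff.mp (by rw [hse]; simp))
          have hMvV : Mv ∈ V := PySem.List.max?_mem hM
          have hmvV : mv ∈ V := PySem.List.min?_mem hm
          have hMub : ∀ y ∈ V, y ≤ Mv := PySem.List.max?_isMax hM
          have hmlb : ∀ y ∈ V, mv ≤ y := PySem.List.min?_isMin hm
          have hMs : Mv ∈ m :: t := by
            rw [← hse]; exact hsperm.mem_iff.mpr ((hmemRV Mv).mpr hMvV)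
          have hlast_eq : (m :: t).getLast (by simp) = Mv :=
            le_antisymm (hMub _ hgmem) (le_getLast_of_pairwise (hse ▸ hsp) Mv hMs (by simp))
          have hmvR : mv ∈ R := (hmemRV mv).mpr hmvV
          have hm_eq : m = mv := le_antisymm (hhead mv hmvR) (hmlb m hmem_m)
          rw [hlast_eq, hm_eq]

theorem solution_spec : Claim_equal_solution := by
  intro operations _ _
  show solution operations = solution_alt operations
  have hInv : InvST ([], [], PySem.Dict.empty, []) [] := by
    refine ⟨List.Pairwise.nil, List.Pairwise.nil, fun v => by simp [PySem.Dict.getD_empty],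
      fun v => by simp, fun v => by simp, fun v hv => by simp at hv⟩
  have h := fold_inv operations _ _ hInv
  simp only [solution, solution_alt]
  exact final_eq _ _ h
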